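-- pv_equiv track=rewrite | github.com/valentin-noske/Bachelor_thesis | Functions/Algorithms/factorizations.py | get_factorizations
-- ===== SOURCE A (Python) =====
-- from typing import List
--
-- def equivalent_marker_sets(marker_sets: List[List[str]]) -> List[List[str]]:
--     marker = list(set_of_markers(marker_sets))
--     set_list = []
--     for m in marker:
--         temp = set()
--         for elem in marker_sets:
--             if m in elem:
--                 for e in elem:
--                     if e != m:
--                         temp.add(e)
--         set_list.append(temp)
--     result = []
--     for u in range(0, len(set_list)):
--         a = []
--         for v in range(0, len(set_list)):
--             if set_list[u] == set_list[v]: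
--                 a.append(marker[v])
--         a.sort()
--         if a not in result:
--             result.append(a)
--     return result
--
-- def get_factorizations(marker_sets: List[List[str]]) -> List[List[List[str]]]:
--     equivalent_markers = equivalent_marker_sets(marker_sets)
--     factorizations = []
--     for m in marker_sets:
--         factorization = []
--         for element in m:
--             for em in equivalent_markers:
--                 if element in em:
--                     factorization.append(em)
--                     break
--         factorization.sort()
--         if factorization not in factorizations:
--             factorizations.append(factorization)
--     return factorizations
--
-- def set_of_markers(marker_sets: List[List[str]]) -> set:
--     marker = set()
--     for elem in marker_sets:
--         for x in elem:
--             marker.add(x)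
--     return marker
-- ===== SOURCE B (Python) =====
-- from typing import List
--
-- def get_factorizations(marker_sets: List[List[str]]) -> List[List[List[str]]]:
--     # neighbor map: marker -> set of other markers it co-occurs with
--     nbr = {}
--     for ms in marker_sets:
--         s = set(ms)
--         for x in ms:
--             nbr.setdefault(x, set()).update(s.difference({x}))
--     # group markers whose neighbor sets are equal (key = canonical sorted tuple)
--     groups = {}
--     for x, s in nbr.items():
--         groups.setdefault(tuple(sorted(s)), []).append(x)
--     # direct marker -> its (sorted) equivalence class
--     cls_of = {}
--     for members in groups.values():
--         members_sorted = sorted(members)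
--         for x in members:
--             cls_of[x] = members_sorted
--     out = []
--     for m in marker_sets:
--         f = sorted(cls_of[e] for e in m)
--         if f not in out:
--             out.append(f)
--     return out
-- ===== Notes on version B (the rewrite author's own statement) =====
-- stated objective: faster
-- what changed: A compares every marker's neighbour set against every other's and scans the class list for each element; B builds the neighbour map in one pass, groups markers by a canonical sorted-neighbour key via a dict, and looks each element's class up in a precomputed marker->class dict.
import Mathlib
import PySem

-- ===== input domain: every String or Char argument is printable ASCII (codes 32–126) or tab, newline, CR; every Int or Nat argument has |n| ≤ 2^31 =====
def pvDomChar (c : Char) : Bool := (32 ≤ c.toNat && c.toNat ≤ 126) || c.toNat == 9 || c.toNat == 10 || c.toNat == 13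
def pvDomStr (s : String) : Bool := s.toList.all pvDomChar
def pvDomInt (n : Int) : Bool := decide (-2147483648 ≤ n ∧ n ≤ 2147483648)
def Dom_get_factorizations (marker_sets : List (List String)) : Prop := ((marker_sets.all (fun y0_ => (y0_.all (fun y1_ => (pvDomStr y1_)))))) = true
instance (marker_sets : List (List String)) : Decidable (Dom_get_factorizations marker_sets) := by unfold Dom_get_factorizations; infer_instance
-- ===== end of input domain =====

-- B replaces A's quadratic all-pairs comparison of neighbour sets and its per-element scan
-- over the class list by dict-based grouping (neighbour map, group-by-sorted-key, marker->class
-- map); objective: faster (asymptotic: O(M*K) grouping instead of O(M^2*K)).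

-- ===== PORT A =====
-- Port of A (equivalent_marker_sets / set_of_markers / get_factorizations), step for step.
-- Python set -> PySem.Set (insertion order); the final result does not depend on set iteration
-- order.  marker[v] with v from range(len) is always in range, ported as List.getD.
-- sorted/.sort() on strings (lists of strings) use the kernel-reducible key String.toList
-- (List.map String.toList), which orders exactly like Python's str (list) comparison.

def pvSetOfMarkers (marker_sets : List (List String)) : PySem.Set String :=
  marker_sets.foldl (fun marker elem =>
    elem.foldl (fun marker x => PySem.Set.add marker x) marker) PySem.Set.empty

def pvTemp (marker_sets : List (List String)) (m : String) : PySem.Set String :=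
  marker_sets.foldl (fun temp elem =>
    if m ∈ elem then
      elem.foldl (fun temp e => if e ≠ m then PySem.Set.add temp e else temp) temp
    else temp) PySem.Set.empty

def pvEquivalentMarkerSets (marker_sets : List (List String)) : List (List String) :=
  let marker : List String := pvSetOfMarkers marker_sets
  let set_list : List (PySem.Set String) :=
    marker.foldl (fun acc m => acc ++ [pvTemp marker_sets m]) []
  (List.range set_list.length).foldl (fun result u =>
    let a : List String :=
      (List.range set_list.length).foldl (fun a v =>
        if PySem.Set.equal (set_list.getD u PySem.Set.empty) (set_list.getD v PySem.Set.empty)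
        then a ++ [marker.getD v ""] else a) []
    let a := PySem.List.sorted a (fun s => s.toList)
    if a ∈ result then result else result ++ [a]) []

-- the 'for em in …: if element in em: append; break' loop
def pvFindClass (ems : List (List String)) (element : String) : List (List String) :=
  match ems with
  | [] => []
  | em :: rest => if element ∈ em then [em] else pvFindClass rest element

def get_factorizations (marker_sets : List (List String)) : List (List (List String)) :=
  let equivalent_markers := pvEquivalentMarkerSets marker_sets
  marker_sets.foldl (fun factorizations m =>
    let f := m.foldl (fun f element => f ++ pvFindClass equivalent_markers element) []
    let f := PySem.List.sorted f (fun l => l.map String.toList)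
    if f ∈ factorizations then factorizations else factorizations ++ [f]) []

-- ===== PORT B =====
-- Port of Source B: one pass builds the neighbour map, a dict keyed by the sorted neighbour
-- list groups equivalent markers, a marker -> class dict replaces A's scan over classes.

def pvNbr (marker_sets : List (List String)) : PySem.Dict String (PySem.Set String) :=
  marker_sets.foldl (fun nbr ms =>
    let s := PySem.Set.ofList ms
    ms.foldl (fun nbr x =>
      nbr.insert x (PySem.Set.update (nbr.getD x PySem.Set.empty) (PySem.Set.diff s [x]))) nbr)
    PySem.Dict.empty

def pvGroups (marker_sets : List (List String)) : PySem.Dict (List String) (List String) :=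
  (pvNbr marker_sets).items.foldl (fun groups p =>
    groups.insert (PySem.List.sorted p.2 (fun s => s.toList))
      (groups.getD (PySem.List.sorted p.2 (fun s => s.toList)) [] ++ [p.1]))
    PySem.Dict.empty

def pvClsOf (marker_sets : List (List String)) : PySem.Dict String (List String) :=
  (pvGroups marker_sets).items.foldl (fun cls p =>
    let msorted := PySem.List.sorted p.2 (fun s => s.toList)
    p.2.foldl (fun cls x => cls.insert x msorted) cls)
    PySem.Dict.empty

def get_factorizations_alt (marker_sets : List (List String)) : List (List (List String)) :=
  let cls := pvClsOf marker_sets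
  marker_sets.foldl (fun out m =>
    let f := PySem.List.sorted (m.map (fun e => cls.getD e []))
      (fun l => l.map String.toList)
    if f ∈ out then out else out ++ [f]) []

-- ===== PRECONDITION & SPEC =====
def Spec_get_factorizations (marker_sets : List (List String)) (out : List (List (List String))) : Prop := out = get_factorizations_alt marker_sets
instance (marker_sets : List (List String)) (out : List (List (List String))) : Decidable (Spec_get_factorizations marker_sets out) := by unfold Spec_get_factorizations; infer_instance

-- ===== CLAIM (what is proved, stated in full; the proofs are below) =====
def Claim_equal_get_factorizations : Prop := ∀ (marker_sets : List (List String)), Dom_get_factorizations marker_sets → Spec_get_factorizations marker_sets (get_factorizations marker_sets)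

-- ===== LEMMAS AND PROOFS =====

-- proof-side abbreviations
def pvKey (marker_sets : List (List String)) (x : String) : List String :=
  PySem.List.sorted ((pvNbr marker_sets).getD x PySem.Set.empty) (fun s => s.toList)

def pvClass (marker_sets : List (List String)) (e : String) : List String :=
  PySem.List.sorted
    ((pvSetOfMarkers marker_sets).filter (fun y => pvKey marker_sets y == pvKey marker_sets e))
    (fun s => s.toList)

lemma pv_toList_inj : Function.Injective String.toList :=
  fun _ _ h => String.toList_inj.mp h

lemma pv_dec_eq : (fun (a b : List Char) => a.decidableLT b)
    = @LinearOrder.toDecidableLT _ List.instLinearOrder :=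
  funext fun _ => funext fun _ => Subsingleton.elim _ _

lemma pv_sorted_pairwise' (xs : List String) :
    List.Pairwise (fun a b : String => a.toList ≤ b.toList)
      (PySem.List.sorted xs (fun s => s.toList)) := by
  rw [show (fun (a b : List Char) => a.decidableLT b)
      = @LinearOrder.toDecidableLT _ List.instLinearOrder from pv_dec_eq]
  exact @PySem.List.sorted_pairwise String (List Char) List.instLinearOrder xs (fun s => s.toList)

-- sorted with the toList key identifies permutations
lemma pv_sorted_eq_iff {xs ys : List String} :
    PySem.List.sorted xs (fun s => s.toList) = PySem.List.sorted ys (fun s => s.toList) ↔ xs.Perm ys := by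
  constructor
  · intro h
    have h1 := PySem.List.sorted_perm xs (fun s => s.toList) false
    have h2 := PySem.List.sorted_perm ys (fun s => s.toList) false
    exact h1.symm.trans (h ▸ h2)
  · intro h
    rw [pv_dec_eq]
    have sp : ∀ zs : List String,
        (@PySem.List.sorted String (List Char) List.instLinearOrder.toLT
          (@LinearOrder.toDecidableLT _ List.instLinearOrder) zs (fun s => s.toList) false).Perm zs :=
      fun zs => @PySem.List.sorted_perm String (List Char) List.instLinearOrder.toLT
        (@LinearOrder.toDecidableLT _ List.instLinearOrder) zs (fun s => s.toList) false
    exact @PySem.List.eq_of_perm_of_pairwise_le_of_injective String (List Char)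
      List.instLinearOrder _ _ (fun s => s.toList) pv_toList_inj
      (((sp xs).trans h).trans (sp ys).symm)
      (by rw [← pv_dec_eq]; exact pv_sorted_pairwise' xs)
      (by rw [← pv_dec_eq]; exact pv_sorted_pairwise' ys)

lemma pv_mem_M_aux (l : List (List String)) (s : PySem.Set String) (y : String) :
    y ∈ l.foldl (fun s elem => elem.foldl (fun s x => PySem.Set.add s x) s) s
      ↔ y ∈ s ∨ ∃ elem ∈ l, y ∈ elem := by
  induction l generalizing s with
  | nil => simp
  | cons elem t ih =>
    simp only [List.foldl_cons, ih]
    rw [show (elem.foldl (fun s x => PySem.Set.add s x) s)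
        = elem.foldl (fun s b => PySem.Set.add s (id b)) s from rfl,
      ← PySem.Set.update_map_eq_foldl_add]
    simp [PySem.Set.mem_update]
    tauto

lemma pv_mem_M {marker_sets : List (List String)} {y : String} :
    y ∈ pvSetOfMarkers marker_sets ↔ ∃ elem ∈ marker_sets, y ∈ elem := by
  rw [pvSetOfMarkers, pv_mem_M_aux]
  simp [PySem.Set.empty]

lemma pv_M_eq_foldl_update (marker_sets : List (List String)) :
    pvSetOfMarkers marker_sets
      = marker_sets.foldl (fun s elem => PySem.Set.update s elem) PySem.Set.empty := by
  rw [pvSetOfMarkers]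
  apply PySem.List.foldl_congr_mem
  intro acc elem _
  rw [show (elem.foldl (fun s x => PySem.Set.add s x) acc)
      = elem.foldl (fun s b => PySem.Set.add s (id b)) acc from rfl,
    ← PySem.Set.update_map_eq_foldl_add]
  simp

lemma pv_nodup_M (marker_sets : List (List String)) : (pvSetOfMarkers marker_sets).Nodup := by
  rw [pv_M_eq_foldl_update]
  have : ∀ (l : List (List String)) (s : PySem.Set String), s.Nodup →
      (l.foldl (fun s elem => PySem.Set.update s elem) s).Nodup := by
    intro l
    induction l with
    | nil => intro s hs; exact hs
    | cons e t ih => intro s hs; exact ih _ (PySem.Set.nodup_update s e hs)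
  exact this _ _ List.nodup_nil

lemma pv_mem_temp_inner (m : String) (elem : List String) (t : PySem.Set String) (y : String) :
    y ∈ elem.foldl (fun t e => if e ≠ m then PySem.Set.add t e else t) t
      ↔ y ∈ t ∨ (y ∈ elem ∧ y ≠ m) := by
  induction elem generalizing t with
  | nil => simp
  | cons e rest ih =>
    simp only [List.foldl_cons, ih]
    by_cases h : e = m
    · simp [h]
      tauto
    · simp [h, PySem.Set.mem_add]
      constructor
      · rintro (( hy | rfl) | hy) <;> tauto
      · rintro (hy | ⟨(rfl | hy), hne⟩) <;> tauto

lemma pv_mem_temp {marker_sets : List (List String)} {m y : String} :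
    y ∈ pvTemp marker_sets m ↔ ∃ elem ∈ marker_sets, m ∈ elem ∧ y ∈ elem ∧ y ≠ m := by
  rw [pvTemp]
  have : ∀ (l : List (List String)) (t : PySem.Set String),
      y ∈ l.foldl (fun temp elem => if m ∈ elem then
          elem.foldl (fun temp e => if e ≠ m then PySem.Set.add temp e else temp) temp
        else temp) t
      ↔ y ∈ t ∨ ∃ elem ∈ l, m ∈ elem ∧ y ∈ elem ∧ y ≠ m := by
    intro l
    induction l with
    | nil => simp
    | cons elem rest ih =>
      intro t
      simp only [List.foldl_cons]
      by_cases h : m ∈ elem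
      · rw [if_pos h, ih, pv_mem_temp_inner]
        simp [h]
        tauto
      · rw [if_neg h, ih]
        simp [h]
  rw [this]
  simp [PySem.Set.empty]

lemma pv_nbr_keys_aux (l : List (List String)) (d : PySem.Dict String (PySem.Set String)) :
    (l.foldl (fun nbr ms =>
      let s := PySem.Set.ofList ms
      ms.foldl (fun nbr x =>
        nbr.insert x (PySem.Set.update (nbr.getD x PySem.Set.empty) (PySem.Set.diff s [x]))) nbr) d).keys
    = l.foldl (fun s elem => PySem.Set.update s elem) d.keys := by
  induction l generalizing d with
  | nil => rfl
  | cons ms rest ih =>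
    simp only [List.foldl_cons]
    rw [ih, PySem.Dict.keys_foldl_insert]

lemma pv_keys_nbr (marker_sets : List (List String)) :
    (pvNbr marker_sets).keys = pvSetOfMarkers marker_sets := by
  rw [pvNbr, pv_nbr_keys_aux, pv_M_eq_foldl_update]
  rfl

lemma pv_mem_nbr {marker_sets : List (List String)} {x y : String} :
    y ∈ (pvNbr marker_sets).getD x PySem.Set.empty ↔
      ∃ elem ∈ marker_sets, x ∈ elem ∧ y ∈ elem ∧ y ≠ x := by
  rw [pvNbr]
  have inner : ∀ (ms : List String) (s : PySem.Set String)
      (d : PySem.Dict String (PySem.Set String)),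
      y ∈ (ms.foldl (fun d z =>
          d.insert z (PySem.Set.update (d.getD z PySem.Set.empty) (PySem.Set.diff s [z]))) d).getD x PySem.Set.empty
        ↔ y ∈ d.getD x PySem.Set.empty ∨ (x ∈ ms ∧ y ∈ s ∧ y ≠ x) := by
    intro ms s
    induction ms with
    | nil => simp
    | cons z rest ih =>
      intro d
      simp only [List.foldl_cons, ih, PySem.Dict.getD_insert]
      by_cases h : x = z
      · subst h
        simp [PySem.Set.mem_update, PySem.Set.mem_diff]
        tauto
      · simp [h]
  have outer : ∀ (l : List (List String)) (d : PySem.Dict String (PySem.Set String)),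
      y ∈ (l.foldl (fun nbr ms =>
          let s := PySem.Set.ofList ms
          ms.foldl (fun nbr x =>
            nbr.insert x (PySem.Set.update (nbr.getD x PySem.Set.empty) (PySem.Set.diff s [x]))) nbr) d).getD x PySem.Set.empty
        ↔ y ∈ d.getD x PySem.Set.empty ∨ ∃ elem ∈ l, x ∈ elem ∧ y ∈ elem ∧ y ≠ x := by
    intro l
    induction l with
    | nil => simp
    | cons ms rest ih =>
      intro d
      simp only [List.foldl_cons, ih, inner, PySem.Set.mem_ofList]
      simp
      tauto
  rw [outer]
  simp [PySem.Dict.getD_empty]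

lemma pv_nodup_nbr (marker_sets : List (List String)) (x : String) :
    ((pvNbr marker_sets).getD x PySem.Set.empty).Nodup := by
  rw [pvNbr]
  have inner : ∀ (ms : List String) (s : PySem.Set String)
      (d : PySem.Dict String (PySem.Set String)),
      (∀ z, (d.getD z PySem.Set.empty).Nodup) →
      ∀ z, ((ms.foldl (fun d z =>
          d.insert z (PySem.Set.update (d.getD z PySem.Set.empty) (PySem.Set.diff s [z]))) d).getD z PySem.Set.empty).Nodup := by
    intro ms s
    induction ms with
    | nil => intro d hd; exact hd
    | cons w rest ih =>
      intro d hd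
      refine ih _ ?_
      intro z
      rw [PySem.Dict.getD_insert]
      split_ifs with h
      · exact PySem.Set.nodup_update _ _ (hd w)
      · exact hd z
  have outer : ∀ (l : List (List String)) (d : PySem.Dict String (PySem.Set String)),
      (∀ z, (d.getD z PySem.Set.empty).Nodup) →
      ∀ z, ((l.foldl (fun nbr ms =>
          let s := PySem.Set.ofList ms
          ms.foldl (fun nbr x =>
            nbr.insert x (PySem.Set.update (nbr.getD x PySem.Set.empty) (PySem.Set.diff s [x]))) nbr) d).getD z PySem.Set.empty).Nodup := by
    intro l
    induction l with
    | nil => intro d hd; exact hd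
    | cons ms rest ih =>
      intro d hd
      exact ih _ (inner ms (PySem.Set.ofList ms) d hd)
  exact outer _ _ (fun z => by simp [PySem.Dict.getD_empty, PySem.Set.empty]) x

-- A's set equality test on neighbour sets = B's canonical-key equality
lemma pv_equal_iff_key (marker_sets : List (List String)) (a b : String) :
    PySem.Set.equal (pvTemp marker_sets a) (pvTemp marker_sets b) = true ↔
      pvKey marker_sets a = pvKey marker_sets b := by
  rw [pvKey, pvKey, pv_sorted_eq_iff, PySem.Set.equal_iff,
    List.perm_ext_iff_of_nodup (pv_nodup_nbr marker_sets a) (pv_nodup_nbr marker_sets b)]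
  constructor
  · intro h y
    have := h y
    rw [pv_mem_temp, pv_mem_temp] at this
    rw [pv_mem_nbr, pv_mem_nbr]
    exact this
  · intro h y
    have := h y
    rw [pv_mem_nbr, pv_mem_nbr] at this
    rw [pv_mem_temp, pv_mem_temp]
    exact this

lemma pv_class_congr {marker_sets : List (List String)} {a b : String}
    (h : pvKey marker_sets a = pvKey marker_sets b) :
    pvClass marker_sets a = pvClass marker_sets b := by
  rw [pvClass, pvClass]
  congr 1
  apply List.filter_congr
  intro y _
  rw [h]

lemma pv_mem_class {marker_sets : List (List String)} {e x : String} :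
    e ∈ pvClass marker_sets x ↔ e ∈ pvSetOfMarkers marker_sets ∧ pvKey marker_sets e = pvKey marker_sets x := by
  rw [pvClass, (PySem.List.sorted_perm _ _ false).mem_iff, List.mem_filter]
  simp

-- ---- B side: cls.getD e [] = pvClass e for markers e ----

lemma pv_items_nbr (marker_sets : List (List String)) :
    (pvNbr marker_sets).items
      = (pvSetOfMarkers marker_sets).map (fun x => (x, (pvNbr marker_sets).getD x PySem.Set.empty)) := by
  rw [PySem.Dict.items_eq_map_keys _ (by rw [pv_keys_nbr]; exact pv_nodup_M _) PySem.Set.empty,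
    pv_keys_nbr]

lemma pv_groups_getD (marker_sets : List (List String)) (k : List String) :
    (pvGroups marker_sets).getD k []
      = (pvSetOfMarkers marker_sets).filter (fun x => pvKey marker_sets x == k) := by
  have aux : ∀ (l : List (String × PySem.Set String)) (d : PySem.Dict (List String) (List String)),
      (l.foldl (fun groups p =>
        groups.insert (PySem.List.sorted p.2 (fun s => s.toList))
          (groups.getD (PySem.List.sorted p.2 (fun s => s.toList)) [] ++ [p.1])) d).getD k []
      = d.getD k [] ++ (l.filter (fun p => PySem.List.sorted p.2 (fun s => s.toList) == k)).map Prod.fst := by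
    intro l
    induction l with
    | nil => simp
    | cons p rest ih =>
      intro d
      simp only [List.foldl_cons, ih]
      by_cases h : PySem.List.sorted p.2 (fun s => s.toList) = k
      · rw [List.filter_cons_of_pos (by simp [h])]
        rw [PySem.Dict.getD_insert, if_pos h.symm, ← h]
        simp
      · rw [List.filter_cons_of_neg (by simp [h])]
        rw [PySem.Dict.getD_insert, if_neg (fun hh => h hh.symm)]
  rw [pvGroups, aux, pv_items_nbr, List.filter_map, List.map_map]
  simp only [PySem.Dict.getD_empty, List.nil_append]
  rw [show (Prod.fst ∘ fun x => (x, (pvNbr marker_sets).getD x PySem.Set.empty)) = id from rfl,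
    List.map_id]
  apply List.filter_congr
  intro x _
  rfl

lemma pv_items_groups (marker_sets : List (List String)) :
    (pvGroups marker_sets).items
      = (PySem.Set.ofList ((pvSetOfMarkers marker_sets).map (pvKey marker_sets))).map
          (fun k => (k, (pvSetOfMarkers marker_sets).filter (fun x => pvKey marker_sets x == k))) := by
  have hkeys : (pvGroups marker_sets).keys
      = PySem.Set.ofList ((pvSetOfMarkers marker_sets).map (pvKey marker_sets)) := by
    rw [pvGroups, PySem.Dict.keys_foldl_insert_key, PySem.Dict.keys_empty,
      PySem.Set.update_nil_left, pv_items_nbr, List.map_map]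
    rfl
  have hnd : (pvGroups marker_sets).keys.Nodup := by
    rw [pvGroups]
    exact PySem.Dict.nodup_keys_foldl_insert_key _ _ _ _ PySem.Dict.nodup_keys_empty
  rw [PySem.Dict.items_eq_map_keys _ hnd [], hkeys]
  apply List.map_congr_left
  intro k _
  rw [pv_groups_getD]

lemma pv_cls_getD {marker_sets : List (List String)} {e : String}
    (he : e ∈ pvSetOfMarkers marker_sets) :
    (pvClsOf marker_sets).getD e [] = pvClass marker_sets e := by
  have aux1 : ∀ (members : List String) (v : List String)
      (c : PySem.Dict String (List String)),
      (members.foldl (fun c x => c.insert x v) c).getD e []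
        = if e ∈ members then v else c.getD e [] := by
    intro members v
    induction members with
    | nil => simp
    | cons x rest ih =>
      intro c
      simp only [List.foldl_cons, ih, PySem.Dict.getD_insert]
      by_cases h : e ∈ rest
      · simp [h]
      · by_cases hx : e = x <;> simp [h, hx]
  have aux2 : ∀ (l : List (List String)) (c : PySem.Dict String (List String)),
      ((l.map (fun k => (k, (pvSetOfMarkers marker_sets).filter (fun x => pvKey marker_sets x == k)))).foldl
        (fun cls p =>
          let msorted := PySem.List.sorted p.2 (fun s => s.toList)
          p.2.foldl (fun cls x => cls.insert x msorted) cls) c).getD e []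
      = if pvKey marker_sets e ∈ l then pvClass marker_sets e else c.getD e [] := by
    intro l
    induction l with
    | nil =>
      intro c
      rw [List.map_nil, List.foldl_nil, if_neg (by simp)]
    | cons k rest ih =>
      intro c
      simp only [List.map_cons, List.foldl_cons]
      rw [ih, aux1]
      have hmem : (e ∈ (pvSetOfMarkers marker_sets).filter (fun x => pvKey marker_sets x == k))
          ↔ k = pvKey marker_sets e := by
        rw [List.mem_filter]
        constructor
        · rintro ⟨_, hb⟩
          exact (beq_iff_eq.mp hb).symm
        · intro hh
          exact ⟨he, by simp [hh]⟩
      by_cases h : k = pvKey marker_sets e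
      · rw [if_pos (hmem.mpr h)]
        subst h
        by_cases hr : pvKey marker_sets e ∈ rest <;> simp [hr, pvClass]
      · rw [if_neg (fun hh => h (hmem.mp hh))]
        have hne : pvKey marker_sets e ≠ k := fun hh => h hh.symm
        by_cases hr : pvKey marker_sets e ∈ rest <;> simp [hr, hne]
  rw [pvClsOf, pv_items_groups, aux2,
    if_pos (by rw [PySem.Set.mem_ofList]; exact List.mem_map_of_mem he)]

-- ---- A side: the scan over equivalence classes finds pvClass e ----

lemma pv_map_getD_range {α β : Type} (M : List α) (d : α) (h : α → β) :
    (List.range M.length).map (fun u => h (M.getD u d)) = M.map h := by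
  apply List.ext_getElem
  · simp
  · intro i h1 h2
    have hi : i < M.length := by simpa using h1
    simp only [List.getElem_map, List.getElem_range]
    rw [List.getD_eq_getElem _ _ hi]

lemma pv_mem_dedup_fold (l : List Nat) (g : Nat → List String)
    (res : List (List String)) (y : List String) :
    y ∈ l.foldl (fun res a => if g a ∈ res then res else res ++ [g a]) res
      ↔ y ∈ res ∨ ∃ a ∈ l, y = g a := by
  induction l generalizing res with
  | nil => simp
  | cons a t ih =>
    simp only [List.foldl_cons, ih]
    by_cases h : g a ∈ res
    · simp only [if_pos h]
      constructor
      · rintro (hy | ⟨b, hb, rfl⟩)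
        · exact Or.inl hy
        · exact Or.inr ⟨b, List.mem_cons_of_mem _ hb, rfl⟩
      · rintro (hy | ⟨b, hb, rfl⟩)
        · exact Or.inl hy
        · rcases List.mem_cons.mp hb with rfl | hb
          · exact Or.inl h
          · exact Or.inr ⟨b, hb, rfl⟩
    · simp only [if_neg h]
      constructor
      · rintro (hy | ⟨b, hb, rfl⟩)
        · rcases List.mem_append.mp hy with hy | hy
          · exact Or.inl hy
          · exact Or.inr ⟨a, List.mem_cons_self .., (List.mem_singleton.mp hy)⟩
        · exact Or.inr ⟨b, List.mem_cons_of_mem _ hb, rfl⟩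
      · rintro (hy | ⟨b, hb, rfl⟩)
        · exact Or.inl (List.mem_append.mpr (Or.inl hy))
        · rcases List.mem_cons.mp hb with rfl | hb
          · exact Or.inl (List.mem_append.mpr (Or.inr (by simp)))
          · exact Or.inr ⟨b, hb, rfl⟩

lemma pv_getD_map {α β : Type} (M : List α) (g : α → β) (v : Nat) (d : α) (db : β)
    (hv : v < M.length) : (M.map g).getD v db = g (M.getD v d) := by
  rw [List.getD_eq_getElem _ _ (by simpa using hv), List.getD_eq_getElem _ _ hv, List.getElem_map]

-- the class A builds for marker index u is pvClass of that marker
lemma pv_classA_eq {marker_sets : List (List String)} (u : Nat)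
    (hu : u < (pvSetOfMarkers marker_sets).length) :
    PySem.List.sorted
      ((List.range (pvSetOfMarkers marker_sets).length).foldl (fun a v =>
        if PySem.Set.equal
            (((pvSetOfMarkers marker_sets).map (pvTemp marker_sets)).getD u PySem.Set.empty)
            (((pvSetOfMarkers marker_sets).map (pvTemp marker_sets)).getD v PySem.Set.empty)
        then a ++ [(pvSetOfMarkers marker_sets).getD v ""] else a) [])
      (fun s => s.toList)
    = pvClass marker_sets ((pvSetOfMarkers marker_sets).getD u "") := by
  rw [PySem.List.foldl_append_if]
  rw [List.filter_congr (q := fun v =>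
      PySem.Set.equal (pvTemp marker_sets ((pvSetOfMarkers marker_sets).getD u ""))
        (pvTemp marker_sets ((pvSetOfMarkers marker_sets).getD v "")))
    (by
      intro v hv
      rw [pv_getD_map _ _ _ "" _ hu, pv_getD_map _ _ _ "" _ (by simpa using hv)])]
  rw [show (fun v => PySem.Set.equal (pvTemp marker_sets ((pvSetOfMarkers marker_sets).getD u ""))
        (pvTemp marker_sets ((pvSetOfMarkers marker_sets).getD v "")))
      = ((fun y => PySem.Set.equal (pvTemp marker_sets ((pvSetOfMarkers marker_sets).getD u ""))
          (pvTemp marker_sets y)) ∘ (fun v => (pvSetOfMarkers marker_sets).getD v "")) from rfl,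
    ← List.filter_map]
  rw [show (List.range (pvSetOfMarkers marker_sets).length).map
        (fun v => (pvSetOfMarkers marker_sets).getD v "")
      = pvSetOfMarkers marker_sets from by
    simpa using pv_map_getD_range (pvSetOfMarkers marker_sets) "" id]
  rw [pvClass]
  simp only [List.nil_append]
  congr 1
  apply List.filter_congr
  intro y _
  rw [Bool.eq_iff_iff, pv_equal_iff_key, beq_iff_eq]
  exact eq_comm

lemma pv_mem_EM {marker_sets : List (List String)} {c : List String} :
    c ∈ pvEquivalentMarkerSets marker_sets ↔
      ∃ x ∈ pvSetOfMarkers marker_sets, c = pvClass marker_sets x := by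
  simp only [pvEquivalentMarkerSets]
  have hset : (pvSetOfMarkers marker_sets).foldl
      (fun acc m => acc ++ [pvTemp marker_sets m]) []
      = (pvSetOfMarkers marker_sets).map (pvTemp marker_sets) := by
    simpa using PySem.List.foldl_append_singleton_eq_map (pvSetOfMarkers marker_sets)
      (f := pvTemp marker_sets) []
  rw [hset, List.length_map]
  rw [pv_mem_dedup_fold _ (fun u => PySem.List.sorted
      ((List.range (pvSetOfMarkers marker_sets).length).foldl (fun a v =>
        if PySem.Set.equal
            (((pvSetOfMarkers marker_sets).map (pvTemp marker_sets)).getD u PySem.Set.empty)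
            (((pvSetOfMarkers marker_sets).map (pvTemp marker_sets)).getD v PySem.Set.empty)
        then a ++ [(pvSetOfMarkers marker_sets).getD v ""] else a) [])
      (fun s => s.toList)) [] c]
  simp only [List.mem_nil_iff, false_or, List.mem_range]
  constructor
  · rintro ⟨u, hu, rfl⟩
    refine ⟨(pvSetOfMarkers marker_sets).getD u "", ?_, (pv_classA_eq u hu)⟩
    rw [List.getD_eq_getElem _ _ hu]
    exact List.getElem_mem hu
  · rintro ⟨x, hx, rfl⟩
    rcases List.mem_iff_getElem.mp hx with ⟨u, hu, rfl⟩
    refine ⟨u, hu, ?_⟩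
    rw [pv_classA_eq u hu, List.getD_eq_getElem _ _ hu]

lemma pv_findClass_eq {L : List (List String)} {c : List String} {e : String}
    (hc : c ∈ L) (hiff : ∀ em ∈ L, (e ∈ em ↔ em = c)) :
    pvFindClass L e = [c] := by
  induction L with
  | nil => cases hc
  | cons em rest ih =>
    by_cases h : e ∈ em
    · have hec : em = c := (hiff em (by simp)).mp h
      subst hec
      rw [pvFindClass, if_pos h]
    · have hne : em ≠ c := fun hec => h ((hiff em (by simp)).mpr hec)
      have hc' : c ∈ rest := by
        rcases hc with _ | hc
        · exact absurd rfl hne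
        · assumption
      rw [pvFindClass, if_neg h]
      exact ih hc' (fun em' hm => hiff em' (List.mem_cons_of_mem _ hm))

lemma pv_findClass_EM {marker_sets : List (List String)} {e : String}
    (he : e ∈ pvSetOfMarkers marker_sets) :
    pvFindClass (pvEquivalentMarkerSets marker_sets) e = [pvClass marker_sets e] := by
  apply pv_findClass_eq (pv_mem_EM.mpr ⟨e, he, rfl⟩)
  intro em hem
  rcases pv_mem_EM.mp hem with ⟨x, hx, rfl⟩
  constructor
  · intro hee
    rcases pv_mem_class.mp hee with ⟨_, hk⟩
    exact (pv_class_congr hk).symm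
  · intro heq
    rw [heq]
    exact pv_mem_class.mpr ⟨he, rfl⟩

-- ===== VERDICT (by name: the statement is the Claim_ definition above) =====
theorem get_factorizations_spec : Claim_equal_get_factorizations := by
  intro marker_sets _
  unfold Spec_get_factorizations
  simp only [get_factorizations, get_factorizations_alt]
  apply PySem.List.foldl_congr_mem
  intro acc m hm
  have hbody : m.foldl
      (fun f element => f ++ pvFindClass (pvEquivalentMarkerSets marker_sets) element) []
      = m.map (fun e => (pvClsOf marker_sets).getD e []) := by
    rw [PySem.List.foldl_append_eq_flatMap, List.nil_append,
      List.flatMap_congr (g := fun e => [(pvClsOf marker_sets).getD e []]) (by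
        intro e hein
        have heM : e ∈ pvSetOfMarkers marker_sets := pv_mem_M.mpr ⟨m, hm, hein⟩
        rw [pv_findClass_EM heM]
        show [pvClass marker_sets e] = [(pvClsOf marker_sets).getD e []]
        rw [pv_cls_getD heM]),
      ← List.map_eq_flatMap]
  rw [hbody]
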